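-- pv_equiv track=rewrite | github.com/kenrick90/Cracking-the-coding-interview | HackerRank and LeetCode/Equal-Too slow.py | minOperationEqual
-- ===== SOURCE A (Python) =====
-- def determineOperation(diff):
-- 	if diff >= 5:
-- 		return 5
-- 	if diff >= 2:
-- 		return 2
-- 	return 1
--
-- def minOperationEqual(arr,n):
-- 	arr.sort(reverse=True)
-- 	operation = 0
-- 	while arr[0] != arr[n-1]:
-- 		operation += 1
-- 		arr[0] -= determineOperation(arr[0]-arr[n-1])
-- 		arr.sort(reverse=True)
-- 	return operation
-- ===== SOURCE B (Python) =====
-- # B: sort once, read the pivot value arr[n-1] of the descending order, and sum the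
-- # closed-form greedy step count d//5 + (d%5)//2 + (d%5)%2 per element above it.
-- # (A also mutates arr in place until it is equalized; B does not mutate arr --
-- # the equivalence claimed is about the return value only.)
-- def minOperationEqual(arr, n):
--     target = sorted(arr, reverse=True)[n - 1]
--     total = 0
--     for x in arr:
--         d = x - target
--         if d > 0:
--             total += d // 5 + (d % 5) // 2 + (d % 5) % 2
--     return total
-- ===== Notes on version B (the rewrite author's own statement) =====
-- stated objective: faster
-- what changed: Replaces the repeated sort-and-decrement simulation (one sort per greedy step) with a single sort to find the pivot value arr[n-1] and a closed-form per-element coin count d//5 + (d%5)//2 + (d%5)%2 summed in one pass.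
import Mathlib
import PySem

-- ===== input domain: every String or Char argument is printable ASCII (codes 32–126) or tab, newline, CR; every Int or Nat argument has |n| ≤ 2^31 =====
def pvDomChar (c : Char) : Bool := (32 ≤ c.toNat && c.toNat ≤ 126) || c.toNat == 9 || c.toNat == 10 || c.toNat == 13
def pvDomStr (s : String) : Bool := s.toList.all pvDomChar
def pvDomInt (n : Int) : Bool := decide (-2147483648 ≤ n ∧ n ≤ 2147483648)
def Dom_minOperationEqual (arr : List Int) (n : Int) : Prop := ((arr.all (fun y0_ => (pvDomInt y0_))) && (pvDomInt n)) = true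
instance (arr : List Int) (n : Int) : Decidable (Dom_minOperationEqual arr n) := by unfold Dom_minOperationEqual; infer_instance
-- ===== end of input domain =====

-- B replaces A's repeated sort-and-decrement simulation by one sort plus a closed-form
-- per-element greedy step count summed in one pass (measured faster; return-value
-- equivalence only: A mutates arr in place, B does not).



-- ===== PORT A =====
def determineOperation (diff : Int) : Int :=
  if diff ≥ 5 then 5
  else if diff ≥ 2 then 2
  else 1

-- A's while loop, step for step; `fuel` is only a termination guard (chosen large
-- enough below for every input Pre_ admits)
def minOpLoop (n : Int) : Nat → List Int → Int → Int
  | 0, _, op => op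
  | f + 1, arr, op =>
    match PySem.List.pyGet? arr 0, PySem.List.pyGet? arr (n - 1) with
    | some a0, some ap =>
      if a0 ≠ ap then
        minOpLoop n f
          (PySem.List.sorted ((a0 - determineOperation (a0 - ap)) :: arr.tail) (fun x => x) true)
          (op + 1)
      else op
    | _, _ => op  -- IndexError in Python; excluded by Pre_

def minOperationEqual (arr : List Int) (n : Int) : Int :=
  let s := PySem.List.sorted arr (fun x => x) true
  let fuel :=
    match PySem.List.pyGet? s (n - 1) with
    | some v => (s.map (fun x => (x - v).toNat)).sum + 1
    | none => 1
  minOpLoop n fuel s 0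

-- ===== PORT B =====
-- d // 5 + (d % 5) // 2 + (d % 5) % 2
def coinCount (d : Int) : Int :=
  PySem.Int.floordiv d 5 + PySem.Int.floordiv (PySem.Int.mod d 5) 2
    + PySem.Int.mod (PySem.Int.mod d 5) 2

def minOperationEqual_alt (arr : List Int) (n : Int) : Int :=
  match PySem.List.pyGet? (PySem.List.sorted arr (fun x => x) true) (n - 1) with
  | some target =>
      arr.foldl (fun total x => if x - target > 0 then total + coinCount (x - target) else total) 0
  | none => 0  -- IndexError in Python; excluded by Pre_

-- ===== PRECONDITION & SPEC =====
-- Pre_: exactly the inputs where Python A returns: arr[n-1] must not raise IndexError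
-- (this forces arr nonempty, so arr[0] is fine too; A then always terminates).
def Pre_minOperationEqual (arr : List Int) (n : Int) : Prop :=
  PySem.Raise.InRange arr.length (n - 1)
instance (arr : List Int) (n : Int) : Decidable (Pre_minOperationEqual arr n) := by
  unfold Pre_minOperationEqual; infer_instance

def pvWitness_minOperationEqual : List Int × Int := ([3, 1, 2, 9], 4)

def Spec_minOperationEqual (arr : List Int) (n : Int) (out : Int) : Prop := out = minOperationEqual_alt arr n
instance (arr : List Int) (n : Int) (out : Int) : Decidable (Spec_minOperationEqual arr n out) := by unfold Spec_minOperationEqual; infer_instance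

-- ===== CLAIM (what is proved, stated in full; the proofs are below) =====
def Claim_equal_minOperationEqual : Prop := ∀ (arr : List Int) (n : Int), Dom_minOperationEqual arr n → Pre_minOperationEqual arr n → Spec_minOperationEqual arr n (minOperationEqual arr n)

-- ===== LEMMAS AND PROOFS =====

-- the greedy coin is between 1 and d (for 1 ≤ d): no step overshoots the target
lemma determineOperation_le (d : Int) (hd : 1 ≤ d) : determineOperation d ≤ d := by
  unfold determineOperation; split_ifs <;> omega

lemma determineOperation_pos (d : Int) : 1 ≤ determineOperation d := by
  unfold determineOperation; split_ifs <;> omega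

-- the closed form counts exactly one more step than after one greedy subtraction
lemma coinCount_step (d : Int) (hd : 1 ≤ d) :
    coinCount d = 1 + coinCount (d - determineOperation d) := by
  unfold coinCount determineOperation
  simp only [PySem.Int.mod_eq_emod_of_pos (show (0:Int) < 5 by norm_num),
    PySem.Int.mod_eq_emod_of_pos (show (0:Int) < 2 by norm_num),
    PySem.Int.floordiv_eq_ediv_of_pos (show (0:Int) < 5 by norm_num),
    PySem.Int.floordiv_eq_ediv_of_pos (show (0:Int) < 2 by norm_num)]
  split_ifs <;> omega

lemma coinCount_zero : coinCount 0 = 0 := by decide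

-- in a descending list, the count bounds pin the element at index p …
lemma getElem_of_counts (v : Int) :
    ∀ (l : List Int) (p : Nat), l.Pairwise (fun a b => b ≤ a) →
      l.countP (fun x => decide (v < x)) ≤ p →
      p < l.countP (fun x => decide (v ≤ x)) →
      ∃ hp : p < l.length, l[p] = v := by
  intro l
  induction l with
  | nil => intro p _ _ h2; simp at h2
  | cons a t ih =>
    intro p hpw h1 h2
    have hta : ∀ x ∈ t, x ≤ a := fun x hx => List.rel_of_pairwise_cons hpw hx
    have htp : t.Pairwise (fun a b => b ≤ a) := hpw.of_cons
    have hc1 := List.countP_cons (p := fun x => decide (v < x)) (a := a) (l := t)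
    have hb1 : (if decide (v < a) = true then 1 else 0) ≤ 1 := by split_ifs <;> omega
    have hb2 : (if decide (v ≤ a) = true then 1 else 0) ≤ 1 := by split_ifs <;> omega
    have hc2 := List.countP_cons (p := fun x => decide (v ≤ x)) (a := a) (l := t)
    match p with
    | 0 =>
      have hva : ¬ v < a := by
        intro h
        simp only [h, decide_true, if_pos] at hc1
        omega
      have hle : v ≤ a := by
        rcases List.countP_pos_iff.mp (show 0 < (a :: t).countP (fun x => decide (v ≤ x)) from h2)
          with ⟨x, hx, hvx⟩
        have hvx : v ≤ x := by simpa using hvx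
        rcases List.mem_cons.mp hx with rfl | hx
        · exact hvx
        · exact le_trans hvx (hta x hx)
      have : a = v := le_antisymm (by omega) hle
      exact ⟨by simp, by simpa using this⟩
    | p + 1 =>
      by_cases hva : v < a
      · simp only [hva, decide_true, if_pos] at hc1
        simp only [le_of_lt hva, decide_true, if_pos] at hc2
        obtain ⟨hp, he⟩ := ih p htp (by omega) (by omega)
        exact ⟨by simpa using Nat.succ_lt_succ hp, by simpa using he⟩
      · have hct : t.countP (fun x => decide (v < x)) = 0 := by
          rw [List.countP_eq_zero]
          intro x hx
          simp only [decide_eq_true_eq]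
          have := hta x hx; omega
        have h2' : p < t.countP (fun x => decide (v ≤ x)) := by omega
        obtain ⟨hp, he⟩ := ih p htp (by omega) h2'
        exact ⟨by simpa using Nat.succ_lt_succ hp, by simpa using he⟩

-- … and conversely the element at index p satisfies the count bounds
lemma counts_of_getElem (v : Int) :
    ∀ (l : List Int) (p : Nat) (hp : p < l.length), l.Pairwise (fun a b => b ≤ a) →
      l[p] = v →
      l.countP (fun x => decide (v < x)) ≤ p ∧ p < l.countP (fun x => decide (v ≤ x)) := by
  intro l
  induction l with
  | nil => intro p hp; simp at hp
  | cons a t ih =>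
    intro p hp hpw he
    have hta : ∀ x ∈ t, x ≤ a := fun x hx => List.rel_of_pairwise_cons hpw hx
    have htp : t.Pairwise (fun a b => b ≤ a) := hpw.of_cons
    have hc1 := List.countP_cons (p := fun x => decide (v < x)) (a := a) (l := t)
    have hb1 : (if decide (v < a) = true then 1 else 0) ≤ 1 := by split_ifs <;> omega
    have hb2 : (if decide (v ≤ a) = true then 1 else 0) ≤ 1 := by split_ifs <;> omega
    have hc2 := List.countP_cons (p := fun x => decide (v ≤ x)) (a := a) (l := t)
    match p with
    | 0 =>
      have ha : a = v := by simpa using he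
      subst ha
      have hz : (a :: t).countP (fun x => decide (a < x)) = 0 := by
        rw [List.countP_eq_zero]
        intro x hx
        simp only [decide_eq_true_eq]
        rcases List.mem_cons.mp hx with rfl | hx
        · omega
        · have := hta x hx; omega
      refine ⟨by omega, ?_⟩
      simp only [le_refl, decide_true, if_pos] at hc2
      omega
    | p + 1 =>
      have hp' : p < t.length := by simpa using hp
      have he' : t[p] = v := by simpa using he
      obtain ⟨c1, c2⟩ := ih p hp' htp he'
      have hva : v ≤ a := le_trans (le_of_eq he'.symm) (hta _ (List.getElem_mem hp'))
      simp only [hva, decide_true, if_pos] at hc2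
      constructor
      · omega
      · omega

-- loop invariant: on a descending list whose p-th element is pinned to v by the count
-- bounds, A's loop adds the closed-form count of every element above v
lemma minOpLoop_eq (v : Int) (n : Int) (N p : Nat)
    (hbr : ∀ l : List Int, l.length = N → PySem.List.pyGet? l (n - 1) = l[p]?) :
    ∀ (f : Nat) (l : List Int) (op : Int),
      l.length = N →
      l.Pairwise (fun a b => b ≤ a) →
      l.countP (fun x => decide (v < x)) ≤ p →
      p < l.countP (fun x => decide (v ≤ x)) →
      (l.map (fun x => (x - v).toNat)).sum < f →
      minOpLoop n f l op = op + (l.map (fun x => if v < x then coinCount (x - v) else 0)).sum := by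
  intro f
  induction f with
  | zero => intro l op _ _ _ _ hf; omega
  | succ f ih =>
    intro l op hlen hpw h1 h2 hf
    obtain ⟨hp, hev⟩ := getElem_of_counts v l p hpw h1 h2
    match l, hpw with
    | h :: t, hpw =>
      have hta : ∀ x ∈ t, x ≤ h := fun x hx => List.rel_of_pairwise_cons hpw hx
      have hap : PySem.List.pyGet? (h :: t) (n - 1) = some v := by
        rw [hbr _ hlen, List.getElem?_eq_getElem hp, hev]
      have hvh : v ≤ h := by
        have hm : (h :: t)[p] ∈ h :: t := List.getElem_mem hp
        rw [hev] at hm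
        rcases List.mem_cons.mp hm with rfl | hm
        · exact le_refl _
        · exact hta _ hm
      by_cases hhv : h = v
      · -- loop exits immediately; all terms of the sum are 0
        subst hhv
        have hsum : (t.map (fun x => if h < x then coinCount (x - h) else 0)).sum = 0 := by
          apply List.sum_eq_zero
          intro x hx
          simp only [List.mem_map] at hx
          obtain ⟨y, hy, rfl⟩ := hx
          have := hta y hy
          rw [if_neg (by omega)]
        simp [minOpLoop, hap, hsum]
      · -- one greedy step
        have hvh' : v < h := lt_of_le_of_ne hvh (fun e => hhv e.symm)
        have hd : 1 ≤ h - v := by omega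
        set c := determineOperation (h - v) with hc
        have hc1 : 1 ≤ c := determineOperation_pos _
        have hcd : c ≤ h - v := determineOperation_le _ hd
        set l' := PySem.List.sorted ((h - c) :: t) (fun x => x) true with hl'
        have hperm : l'.Perm ((h - c) :: t) := PySem.List.sorted_perm _ _ _
        have hlen' : l'.length = N := by
          rw [hperm.length_eq]; simpa using hlen
        have hpw' : l'.Pairwise (fun a b => b ≤ a) := by
          simpa using PySem.List.sorted_pairwise_rev ((h - c) :: t) (fun x => x)
        have hcount1 : l'.countP (fun x => decide (v < x)) ≤ p := by
          rw [hperm.countP_eq]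
          have hcons := List.countP_cons (p := fun x => decide (v < x)) (a := h - c) (l := t)
          have hcons2 := List.countP_cons (p := fun x => decide (v < x)) (a := h) (l := t)
          simp only [hvh', decide_true, if_pos] at hcons2
          have hb : (if decide (v < h - c) = true then 1 else 0) ≤ 1 := by split_ifs <;> omega
          omega
        have hcount2 : p < l'.countP (fun x => decide (v ≤ x)) := by
          rw [hperm.countP_eq]
          have hcons := List.countP_cons (p := fun x => decide (v ≤ x)) (a := h - c) (l := t)
          have hcons2 := List.countP_cons (p := fun x => decide (v ≤ x)) (a := h) (l := t)
          simp only [show v ≤ h - c by omega, decide_true, if_pos] at hcons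
          simp only [hvh, decide_true, if_pos] at hcons2
          omega
        have hfuel : (l'.map (fun x => (x - v).toNat)).sum < f := by
          have hmp : (l'.map (fun x => (x - v).toNat)).Perm
              (((h - c) :: t).map (fun x => (x - v).toNat)) := hperm.map _
          rw [hmp.sum_eq]
          simp only [List.map_cons, List.sum_cons] at hf ⊢
          have : (h - c - v).toNat + c.toNat = (h - v).toNat := by omega
          omega
        have hstep := ih l' (op + 1) hlen' hpw' hcount1 hcount2 hfuel
        have hsum' : (l'.map (fun x => if v < x then coinCount (x - v) else 0)).sum
            = (((h - c) :: t).map (fun x => if v < x then coinCount (x - v) else 0)).sum :=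
          (hperm.map _).sum_eq
        have hkey : (1 : Int) + (if v < h - c then coinCount (h - c - v) else 0)
            = coinCount (h - v) := by
          by_cases hpos : v < h - c
          · have hrec : coinCount (h - v) = 1 + coinCount (h - v - c) := by
              rw [coinCount_step (h - v) hd, ← hc]
            rw [if_pos hpos, hrec, show h - c - v = h - v - c by ring]
          · rw [if_neg hpos]
            have : h - c = v := by omega
            rw [coinCount_step (h - v) hd, ← hc,
              show h - v - c = 0 by omega, coinCount_zero]
        show minOpLoop n (f + 1) (h :: t) op = _
        rw [minOpLoop]
        simp only [PySem.List.pyGet?_zero_cons, hap]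
        rw [if_pos hhv]
        show minOpLoop n f (PySem.List.sorted ((h - determineOperation (h - v)) :: t) (fun x => x) true) (op + 1) = _
        rw [← hc, ← hl', hstep, hsum']
        simp only [List.map_cons, List.sum_cons]
        rw [if_pos hvh']
        omega

-- ===== VERDICT (by name: the statement is the Claim_ definition above) =====
theorem minOperationEqual_spec : Claim_equal_minOperationEqual := by
  intro arr n _ hpre
  unfold Spec_minOperationEqual
  unfold Pre_minOperationEqual PySem.Raise.InRange at hpre
  set N := arr.length with hN
  set s := PySem.List.sorted arr (fun x => x) true with hs
  have hsperm : s.Perm arr := PySem.List.sorted_perm _ _ _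
  have hslen : s.length = N := by rw [hsperm.length_eq]
  have hspw : s.Pairwise (fun a b => b ≤ a) := by
    simpa using PySem.List.sorted_pairwise_rev arr (fun x => x)
  -- the Python index p for n-1
  set p : Nat := if 0 ≤ n - 1 then (n - 1).toNat else (n - 1 + N).toNat with hp
  have hpN : p < N := by
    rcases hpre with ⟨h1, h2⟩
    by_cases hnn : 0 ≤ n - 1
    · rw [hp, if_pos hnn]; omega
    · rw [hp, if_neg hnn]; omega
  have hbr : ∀ l : List Int, l.length = N → PySem.List.pyGet? l (n - 1) = l[p]? := by
    intro l hl
    by_cases hnn : 0 ≤ n - 1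
    · rw [PySem.List.pyGet?_of_nonneg l hnn, hp, if_pos hnn]
    · have hk : n - 1 = -(((1 - n).toNat : Nat) : Int) := by omega
      rw [hk, PySem.List.pyGet?_neg_natCast _ _ (by omega) (by omega : (1 - n).toNat ≤ l.length)]
      rw [hp, if_neg hnn, hl]
      congr 1
      omega
  -- the pivot value
  have hpv : p < s.length := by omega
  set v := s[p]'hpv with hv
  have hsome : PySem.List.pyGet? s (n - 1) = some v := by
    rw [hbr s hslen, List.getElem?_eq_getElem hpv]
  obtain ⟨hc1, hc2⟩ := counts_of_getElem v s p hpv hspw rfl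
  -- evaluate A
  have hA : minOperationEqual arr n
      = (s.map (fun x => if v < x then coinCount (x - v) else 0)).sum := by
    show minOpLoop n _ s 0 = _
    rw [hsome]
    show minOpLoop n ((s.map (fun x => (x - v).toNat)).sum + 1) s 0 = _
    rw [minOpLoop_eq v n N p hbr _ s 0 hslen hspw hc1 hc2 (by omega)]
    ring
  -- evaluate B
  have hB : minOperationEqual_alt arr n
      = (arr.map (fun x => if v < x then coinCount (x - v) else 0)).sum := by
    show (match PySem.List.pyGet? s (n - 1) with
      | some target => arr.foldl (fun total x => if x - target > 0 then total + coinCount (x - target) else total) 0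
      | none => 0) = _
    rw [hsome]
    show arr.foldl (fun total x => if x - v > 0 then total + coinCount (x - v) else total) 0 = _
    have hfe : (fun (total : Int) (x : Int) => if x - v > 0 then total + coinCount (x - v) else total)
        = fun total x => total + (if v < x then coinCount (x - v) else 0) := by
      funext total x
      by_cases hx : v < x
      · rw [if_pos (by omega), if_pos hx]
      · rw [if_neg (by omega), if_neg hx]; ring
    rw [hfe, PySem.List.foldl_add]
    ring
  rw [hA, hB]
  exact ((hsperm.map _).sum_eq)
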